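-- pv_equiv track=rewrite | github.com/pypi-data/pypi-mirror-386 | packages/eremitalpa/eremitalpa-1.1.13-py3-none-any.whl/eremitalpa/bio.py | idx_first_and_last_non_gap
-- ===== SOURCE A (Python) =====
-- def idx_first_and_last_non_gap(sequence: str) -> tuple[int, int]:
--     """Finds the indices of the first and last non-gap characters.
--
--     If all characters are gaps, the behavior is determined by the loop logic
--     (likely resulting in an UnboundLocalError if not handled).
--
--     Args:
--         sequence (str): The input sequence, which may contain gaps ('-').
--
--     Returns:
--         tuple[int, int]: A tuple containing the indices of the first and last
--             non-gap characters.
--     """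
--     for i, char in enumerate(sequence):
--         if char != "-":
--             first_non_gap = i
--             break
--
--     for i in range(len(sequence) - 1, -1, -1):
--         if sequence[i] != "-":
--             last_non_gap = i
--             break
--
--     return first_non_gap, last_non_gap
-- ===== SOURCE B (Python) =====
-- def idx_first_and_last_non_gap(sequence: str) -> tuple[int, int]:
--     """Single forward pass: record the first non-gap index once, the last every time."""
--     found_first = False
--     for i, char in enumerate(sequence):
--         if char != "-":
--             if not found_first:
--                 first_non_gap = i
--                 found_first = True
--             last_non_gap = i
--     return first_non_gap, last_non_gap
-- ===== Notes on version B (the rewrite author's own statement) =====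
-- stated objective: simpler
-- what changed: Replaces A's two scans (a forward scan and a separate backward index scan) by one forward pass that records the first non-gap index once and the last non-gap index on every hit.
import Mathlib
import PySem

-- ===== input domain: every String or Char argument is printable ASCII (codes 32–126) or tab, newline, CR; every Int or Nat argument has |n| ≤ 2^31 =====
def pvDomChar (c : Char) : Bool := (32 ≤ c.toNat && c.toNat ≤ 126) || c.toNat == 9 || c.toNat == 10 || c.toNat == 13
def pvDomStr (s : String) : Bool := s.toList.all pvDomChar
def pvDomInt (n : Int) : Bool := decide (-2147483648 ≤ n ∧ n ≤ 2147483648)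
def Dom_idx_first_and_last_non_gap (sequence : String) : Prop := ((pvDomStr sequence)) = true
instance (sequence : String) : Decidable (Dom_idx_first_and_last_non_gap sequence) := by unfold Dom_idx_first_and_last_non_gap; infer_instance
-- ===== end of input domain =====

-- B is one forward pass instead of A's forward scan plus separate backward index scan (objective: simpler).

-- ===== PORT A =====
-- A's first loop: 'for i, char in enumerate(sequence): if char != "-": first_non_gap = i; break'
def firstLoopA : List Char → Int → Option Int
  | [], _ => none
  | c :: rest, i => if c ≠ '-' then some i else firstLoopA rest (i + 1)

-- A's second loop: 'for i in range(len(sequence)-1, -1, -1): if sequence[i] != "-": last_non_gap = i; break'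
-- recursion on the number k of indices still to visit; the index visited at step k+1 is k
-- (sequence[k] accessed via getD, exact since k < len within the loop)
def lastLoopA (l : List Char) : Nat → Option Int
  | 0 => none
  | k + 1 => if l.getD k '-' ≠ '-' then some (k : Int) else lastLoopA l k

-- 'none' corresponds to UnboundLocalError (excluded by Pre_); getD 0 is a placeholder there
def idx_first_and_last_non_gap (sequence : String) : Int × Int :=
  ((firstLoopA sequence.toList 0).getD 0,
   (lastLoopA sequence.toList sequence.toList.length).getD 0)

-- ===== PORT B =====
-- one fold over enumerate(sequence): first set once (None = not found_first), last set on every non-gap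
def stepB (st : Option Int × Option Int) (ic : Int × Char) : Option Int × Option Int :=
  if ic.2 ≠ '-' then
    ((match st.1 with | none => some ic.1 | some f => some f), some ic.1)
  else st

def idx_first_and_last_non_gap_alt (sequence : String) : Int × Int :=
  (((PySem.List.enumerate sequence.toList 0).foldl stepB (none, none)).1.getD 0,
   ((PySem.List.enumerate sequence.toList 0).foldl stepB (none, none)).2.getD 0)

-- ===== PRECONDITION & SPEC =====
-- Pre_ excludes sequences consisting only of gaps (including the empty string), on which
-- the Python A (and B alike) raises UnboundLocalError.
def Pre_idx_first_and_last_non_gap (sequence : String) : Prop :=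
  sequence.toList.any (fun c => c ≠ '-') = true
instance (sequence : String) : Decidable (Pre_idx_first_and_last_non_gap sequence) := by
  unfold Pre_idx_first_and_last_non_gap; infer_instance

def pvWitness_idx_first_and_last_non_gap : String := "-ab-"

def Spec_idx_first_and_last_non_gap (sequence : String) (out : Int × Int) : Prop := out = idx_first_and_last_non_gap_alt sequence
instance (sequence : String) (out : Int × Int) : Decidable (Spec_idx_first_and_last_non_gap sequence out) := by unfold Spec_idx_first_and_last_non_gap; infer_instance

-- ===== CLAIM (what is proved, stated in full; the proofs are below) =====
def Claim_equal_idx_first_and_last_non_gap : Prop := ∀ (sequence : String), Dom_idx_first_and_last_non_gap sequence → Pre_idx_first_and_last_non_gap sequence → Spec_idx_first_and_last_non_gap sequence (idx_first_and_last_non_gap sequence)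

-- ===== LEMMAS AND PROOFS =====

-- first component of B's fold = A's first loop (when the flag starts unset)
theorem fold_fst (l : List Char) (s : Int) (st : Option Int × Option Int) :
    ((PySem.List.enumerate l s).foldl stepB st).1
      = (match st.1 with | none => firstLoopA l s | some v => some v) := by
  induction l generalizing s st with
  | nil => cases h : st.1 <;> simp [PySem.List.enumerate_nil, firstLoopA, h]
  | cons c rest ih =>
    rw [PySem.List.enumerate_cons, List.foldl_cons, ih]
    by_cases hc : c = '-'
    · cases h : st.1 <;> simp [stepB, hc, firstLoopA, h]
    · cases h : st.1 <;> simp [stepB, hc, firstLoopA, h]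

-- lastLoopA ignores appended tail as long as only the first l.length indices are visited
theorem lastLoopA_append (l : List Char) (c : Char) (k : Nat) (hk : k ≤ l.length) :
    lastLoopA (l ++ [c]) k = lastLoopA l k := by
  induction k with
  | zero => simp [lastLoopA]
  | succ k ih =>
    have hk' : k < l.length := hk
    have : (l ++ [c]).getD k '-' = l.getD k '-' := by
      simp [List.getD, List.getElem?_append_left hk']
    rw [lastLoopA, lastLoopA, this, ih (Nat.le_of_lt hk')]

-- second component of B's fold = A's backward loop
theorem fold_snd (l : List Char) (st : Option Int × Option Int) :
    ((PySem.List.enumerate l 0).foldl stepB st).2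
      = (match lastLoopA l l.length with | none => st.2 | some v => some v) := by
  induction l using List.reverseRecOn generalizing st with
  | nil => simp [PySem.List.enumerate_nil, lastLoopA]
  | append_singleton l c ih =>
    rw [PySem.List.enumerate_append, List.foldl_append]
    have hget : (l ++ [c]).getD l.length '-' = c := by
      simp [List.getD]
    by_cases hc : c = '-'
    · have : stepB ((PySem.List.enumerate l 0).foldl stepB st) ((0 : Int) + l.length, c)
          = (PySem.List.enumerate l 0).foldl stepB st := by
        simp [stepB, hc]
      simp only [PySem.List.enumerate_cons, PySem.List.enumerate_nil, List.foldl_cons,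
        List.foldl_nil, this, ih]
      rw [List.length_append, List.length_singleton, lastLoopA, hget,
        lastLoopA_append l c l.length (le_refl _)]
      simp [hc]
    · simp only [PySem.List.enumerate_cons, PySem.List.enumerate_nil, List.foldl_cons,
        List.foldl_nil]
      rw [List.length_append, List.length_singleton, lastLoopA, hget]
      simp [stepB, hc]

-- ===== VERDICT (by name: the statement is the Claim_ definition above) =====
theorem idx_first_and_last_non_gap_spec : Claim_equal_idx_first_and_last_non_gap := by
  intro sequence _ _
  unfold Spec_idx_first_and_last_non_gap idx_first_and_last_non_gap idx_first_and_last_non_gap_alt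
  rw [fold_fst, fold_snd]
  cases h1 : firstLoopA sequence.toList 0 <;>
    cases h2 : lastLoopA sequence.toList sequence.toList.length <;> simp
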